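-- pv_equiv track=rewrite | github.com/jeremiah-c-leary/eda-log-file-warning-suppressor | elfws/vendor/mentor_graphics/questa_cdc__cdc_detail_rpt.py | is_logfile
-- ===== SOURCE A (Python) =====
-- def is_logfile(lFile):
--     fToolFound = False
--     for iLineNumber, sLine in enumerate(lFile):
--         if fToolFound:
--            if sLine.startswith('Clock Domain Crossing Analysis Report.'):
--                return True
--         if sLine.startswith('Questa CDC Version'):
--             fToolFound = True
--         if iLineNumber == 10:
--             break
--     return False
-- ===== SOURCE B (Python) =====
-- def is_logfile(lFile):
--     head = lFile[:11]
--     vers = [i for i, l in enumerate(head) if l.startswith('Questa CDC Version')]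
--     reps = [i for i, l in enumerate(head) if l.startswith('Clock Domain Crossing Analysis Report.')]
--     return bool(vers) and bool(reps) and min(vers) < max(reps)
-- ===== Notes on version B (the rewrite author's own statement) =====
-- stated objective: alternative
-- what changed: Replaces A's latching-flag stateful scan with an index-arithmetic formulation: collect the indices of version-header lines and of report-header lines in the first 11 lines, then answer min(version indices) < max(report indices).
import Mathlib
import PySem

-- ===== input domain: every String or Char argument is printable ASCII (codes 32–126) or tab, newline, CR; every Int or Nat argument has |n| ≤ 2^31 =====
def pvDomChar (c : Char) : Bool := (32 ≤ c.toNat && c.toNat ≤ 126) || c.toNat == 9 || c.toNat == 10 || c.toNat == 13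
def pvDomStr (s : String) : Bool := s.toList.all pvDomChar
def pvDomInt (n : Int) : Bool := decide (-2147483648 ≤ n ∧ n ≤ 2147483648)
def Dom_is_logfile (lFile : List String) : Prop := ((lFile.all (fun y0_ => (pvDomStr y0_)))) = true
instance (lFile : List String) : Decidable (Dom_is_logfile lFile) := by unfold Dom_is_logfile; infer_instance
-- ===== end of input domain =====

-- B replaces A's latching-flag stateful scan with an index-arithmetic formulation over the
-- first 11 lines: min(version-line indices) < max(report-line indices); objective: alternative.

-- ===== PORT A =====
-- literal transliteration of A's latching-flag loop with enumerate counter and break at index 10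
def isLogfileGoA : List String → Nat → Bool → Bool
  | [], _, _ => false
  | sLine :: rest, iLineNumber, fToolFound =>
    if fToolFound && PySem.Str.startswith sLine "Clock Domain Crossing Analysis Report." then
      true
    else
      let fToolFound' := fToolFound || PySem.Str.startswith sLine "Questa CDC Version"
      if iLineNumber == 10 then false
      else isLogfileGoA rest (iLineNumber + 1) fToolFound'

def is_logfile (lFile : List String) : Bool := isLogfileGoA lFile 0 false

-- ===== PORT B =====
def is_logfile_alt (lFile : List String) : Bool :=
  let head := PySem.List.slice lFile none (some 11)
  let vers := ((PySem.List.enumerate head).filter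
      (fun p => PySem.Str.startswith p.2 "Questa CDC Version")).map (fun p => p.1)
  let reps := ((PySem.List.enumerate head).filter
      (fun p => PySem.Str.startswith p.2 "Clock Domain Crossing Analysis Report.")).map (fun p => p.1)
  !vers.isEmpty && !reps.isEmpty &&
    (match PySem.List.min? vers (fun x => x), PySem.List.max? reps (fun x => x) with
     | some a, some b => decide (a < b)
     | _, _ => false)

-- ===== PRECONDITION & SPEC =====
def Spec_is_logfile (lFile : List String) (out : Bool) : Prop := out = is_logfile_alt lFile
instance (lFile : List String) (out : Bool) : Decidable (Spec_is_logfile lFile out) := by unfold Spec_is_logfile; infer_instance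

-- ===== CLAIM (what is proved, stated in full; the proofs are below) =====
def Claim_equal_is_logfile : Prop := ∀ (lFile : List String), Dom_is_logfile lFile → Spec_is_logfile lFile (is_logfile lFile)

-- ===== LEMMAS AND PROOFS =====

-- proof-side intermediate form: find first version line, then scan the suffix
def isLogfileGoB : List String → Bool
  | [] => false
  | line :: rest =>
    if PySem.Str.startswith line "Questa CDC Version" then
      rest.any (fun l => PySem.Str.startswith l "Clock Domain Crossing Analysis Report.")
    else isLogfileGoB rest

def versIdx (s : Int) (xs : List String) : List Int :=
  ((PySem.List.enumerate xs s).filter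
      (fun p => PySem.Str.startswith p.2 "Questa CDC Version")).map (fun p => p.1)

def repsIdx (s : Int) (xs : List String) : List Int :=
  ((PySem.List.enumerate xs s).filter
      (fun p => PySem.Str.startswith p.2 "Clock Domain Crossing Analysis Report.")).map (fun p => p.1)

def altCore (s : Int) (xs : List String) : Bool :=
  !(versIdx s xs).isEmpty && !(repsIdx s xs).isEmpty &&
    (match PySem.List.min? (versIdx s xs) (fun x => x), PySem.List.max? (repsIdx s xs) (fun x => x) with
     | some a, some b => decide (a < b)
     | _, _ => false)

theorem versIdx_cons (s : Int) (x : String) (xs : List String) :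
    versIdx s (x :: xs) =
      (if PySem.Str.startswith x "Questa CDC Version" then [s] else []) ++ versIdx (s+1) xs := by
  simp only [versIdx, PySem.List.enumerate_cons, List.filter_cons]
  split <;> simp

theorem repsIdx_cons (s : Int) (x : String) (xs : List String) :
    repsIdx s (x :: xs) =
      (if PySem.Str.startswith x "Clock Domain Crossing Analysis Report." then [s] else []) ++ repsIdx (s+1) xs := by
  simp only [repsIdx, PySem.List.enumerate_cons, List.filter_cons]
  split <;> simp

theorem versIdx_ge (s : Int) (xs : List String) : ∀ i ∈ versIdx s xs, s ≤ i := by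
  intro i hi
  simp only [versIdx, List.mem_map, List.mem_filter] at hi
  obtain ⟨p, ⟨hpm, _⟩, hp1⟩ := hi
  rw [PySem.List.mem_enumerate_iff] at hpm
  obtain ⟨k, hk, rfl⟩ := hpm
  simp at hp1 ⊢
  omega

theorem repsIdx_ge (s : Int) (xs : List String) : ∀ i ∈ repsIdx s xs, s ≤ i := by
  intro i hi
  simp only [repsIdx, List.mem_map, List.mem_filter] at hi
  obtain ⟨p, ⟨hpm, _⟩, hp1⟩ := hi
  rw [PySem.List.mem_enumerate_iff] at hpm
  obtain ⟨k, hk, rfl⟩ := hpm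
  simp at hp1 ⊢
  omega

theorem repsIdx_empty_iff (s : Int) (xs : List String) :
    (repsIdx s xs).isEmpty =
      !(xs.any (fun l => PySem.Str.startswith l "Clock Domain Crossing Analysis Report.")) := by
  induction xs generalizing s with
  | nil => simp [repsIdx, PySem.List.enumerate_nil]
  | cons x xs ih =>
    rw [repsIdx_cons, List.any_cons]
    by_cases h : PySem.Str.startswith x "Clock Domain Crossing Analysis Report." = true
    · rw [if_pos h, h]; simp
    · rw [if_neg h, Bool.not_eq_true] at *
      rw [h, List.nil_append, ih (s+1)]
      simp

theorem foldl_min_of_le (t : List Int) : ∀ a : Int, (∀ y ∈ t, a ≤ y) → t.foldl min a = a := by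
  induction t with
  | nil => intro a _; rfl
  | cons b t ih =>
    intro a h
    have hab : min a b = a := by
      have := h b (by simp)
      omega
    simp only [List.foldl_cons, hab]
    exact ih a (fun y hy => h y (by simp [hy]))

-- the key step: the suffix-scan form equals the min/max index comparison
theorem goB_eq_altCore (xs : List String) : ∀ s : Int, isLogfileGoB xs = altCore s xs := by
  induction xs with
  | nil => intro s; simp [isLogfileGoB, altCore, versIdx, repsIdx, PySem.List.enumerate_nil]
  | cons x xs ih =>
    intro s
    by_cases hv : PySem.Str.startswith x "Questa CDC Version" = true
    · -- version line found: goB scans the suffix; altCore: min vers = s, max reps > s iff a report follows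
      have hvers : versIdx s (x :: xs) = s :: versIdx (s+1) xs := by
        rw [versIdx_cons, if_pos hv]; rfl
      have hmin : PySem.List.min? (versIdx s (x :: xs)) (fun x => x) = some s := by
        rw [hvers, PySem.List.min?_id_cons]
        congr 1
        exact foldl_min_of_le _ s (fun y hy => le_trans (by omega) (versIdx_ge (s+1) xs y hy))
      simp only [isLogfileGoB]
      rw [if_pos hv]
      by_cases hrany : xs.any (fun l => PySem.Str.startswith l "Clock Domain Crossing Analysis Report.") = true
      · -- some report line in xs: repsIdx (s+1) xs nonempty, its max > s
        have hne : (repsIdx (s+1) xs).isEmpty = false := by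
          rw [repsIdx_empty_iff, hrany]; rfl
        obtain ⟨m, t, hmt⟩ : ∃ m t, repsIdx (s+1) xs = m :: t := by
          cases h : repsIdx (s+1) xs with
          | nil => rw [h] at hne; simp at hne
          | cons m t => exact ⟨m, t, rfl⟩
        have hreps_ne : (repsIdx s (x :: xs)).isEmpty = false := by
          rw [repsIdx_cons, hmt]; split <;> rfl
        obtain ⟨b, hb⟩ : ∃ b, PySem.List.max? (repsIdx s (x :: xs)) (fun x => x) = some b := by
          cases h : PySem.List.max? (repsIdx s (x :: xs)) (fun x => x) with
          | none =>
            rw [PySem.List.max?_eq_none_iff] at h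
            rw [h] at hreps_ne; simp at hreps_ne
          | some b => exact ⟨b, rfl⟩
        have hsb : s < b := by
          have hmem : m ∈ repsIdx s (x :: xs) := by
            rw [repsIdx_cons, hmt]; split <;> simp
          have h1 := PySem.List.max?_isMax (key := fun x => x) hb m hmem
          have h2 : s + 1 ≤ m := repsIdx_ge (s+1) xs m (by rw [hmt]; simp)
          simp at h1
          omega
        unfold altCore
        rw [hmin, hb, hrany, hvers]
        simp [hreps_ne, hsb]
      · -- no report line in xs: either reps is empty or its max is s itself, never > s
        rw [Bool.not_eq_true] at hrany
        have he : (repsIdx (s+1) xs).isEmpty = true := by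
          rw [repsIdx_empty_iff, hrany]; rfl
        have hnil : repsIdx (s+1) xs = [] := by
          cases h : repsIdx (s+1) xs with
          | nil => rfl
          | cons m t => rw [h] at he; simp at he
        unfold altCore
        rw [hmin, hrany, repsIdx_cons, hnil, List.append_nil]
        by_cases hr : PySem.Str.startswith x "Clock Domain Crossing Analysis Report." = true
        · rw [if_pos hr]
          have hmax : PySem.List.max? [s] (fun x => x) = some s := rfl
          rw [hmax]
          simp
        · rw [if_neg hr]
          have hmax : PySem.List.max? ([] : List Int) (fun x => x) = none := rfl
          rw [hmax]
          simp
    · -- not a version line: peel it off on both sides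
      have hvers : versIdx s (x :: xs) = versIdx (s+1) xs := by
        rw [versIdx_cons, if_neg hv, List.nil_append]
      simp only [isLogfileGoB]
      rw [if_neg hv, ih (s+1)]
      by_cases hr : PySem.Str.startswith x "Clock Domain Crossing Analysis Report." = true
      · -- x is a report line at index s, but every version index is ≥ s+1 so it never matters
        have hreps : repsIdx s (x :: xs) = s :: repsIdx (s+1) xs := by
          rw [repsIdx_cons, if_pos hr]; rfl
        unfold altCore
        rw [hvers, hreps]
        cases hvn : versIdx (s+1) xs with
        | nil => simp [PySem.List.min?]
        | cons v vt =>
          have hsa_all : ∀ y ∈ versIdx (s+1) xs, s + 1 ≤ y := versIdx_ge (s+1) xs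
          obtain ⟨a, ha, hsa⟩ : ∃ a, PySem.List.min? (versIdx (s+1) xs) (fun x => x) = some a ∧ s + 1 ≤ a := by
            rw [hvn, PySem.List.min?_id_cons]
            refine ⟨_, rfl, ?_⟩
            rcases PySem.List.foldl_min_mem (t := vt) (a := v) with h | h
            · rw [h]; exact hsa_all v (by rw [hvn]; simp)
            · exact hsa_all _ (by rw [hvn]; simp [h])
          rw [hvn] at ha
          rw [ha]
          cases hrn : repsIdx (s+1) xs with
          | nil =>
            have hmax : PySem.List.max? [s] (fun x => x) = some s := rfl
            rw [hmax]
            have hmax0 : PySem.List.max? ([] : List Int) (fun x => x) = none := rfl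
            rw [hmax0]
            simp
            omega
          | cons m t =>
            have hm : s + 1 ≤ m := repsIdx_ge (s+1) xs m (by rw [hrn]; simp)
            rw [PySem.List.max?_id_cons, PySem.List.max?_id_cons]
            simp only [List.foldl_cons]
            have hms : max s m = m := by omega
            simp [hms]
      · have hreps : repsIdx s (x :: xs) = repsIdx (s+1) xs := by
          rw [repsIdx_cons, if_neg hr, List.nil_append]
        unfold altCore
        rw [hvers, hreps]

theorem isLogfileGoA_true (xs : List String) : ∀ n : Nat, n ≤ 10 →
    isLogfileGoA xs n true =
      (xs.take (11 - n)).any (fun l => PySem.Str.startswith l "Clock Domain Crossing Analysis Report.") := by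
  induction xs with
  | nil => intro n _; simp [isLogfileGoA]
  | cons s rest ih =>
    intro n hn
    have hw : 11 - n = (10 - n) + 1 := by omega
    rw [hw]
    by_cases hrep : PySem.Str.startswith s "Clock Domain Crossing Analysis Report." = true <;>
      simp at hrep
    · simp [isLogfileGoA, hrep]
    · by_cases h10 : n = 10
      · subst h10; simp [isLogfileGoA, hrep]
      · have : isLogfileGoA rest (n+1) true =
            (rest.take (11 - (n+1))).any (fun l => PySem.Str.startswith l "Clock Domain Crossing Analysis Report.") :=
          ih (n+1) (by omega)
        have hw2 : 11 - (n+1) = 10 - n := by omega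
        simp [isLogfileGoA, hrep, h10, this, hw2]

theorem isLogfileGoA_false (xs : List String) : ∀ n : Nat, n ≤ 10 →
    isLogfileGoA xs n false = isLogfileGoB (xs.take (11 - n)) := by
  induction xs with
  | nil => intro n _; simp [isLogfileGoA, isLogfileGoB]
  | cons s rest ih =>
    intro n hn
    have hw : 11 - n = (10 - n) + 1 := by omega
    rw [hw]
    by_cases hver : PySem.Str.startswith s "Questa CDC Version" = true <;>
      simp at hver
    · by_cases h10 : n = 10
      · subst h10; simp [isLogfileGoA, isLogfileGoB, hver]
      · have hw2 : 11 - (n+1) = 10 - n := by omega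
        have := isLogfileGoA_true rest (n+1) (by omega)
        rw [hw2] at this
        simp at this
        simp [isLogfileGoA, isLogfileGoB, hver, h10, this]
    · by_cases h10 : n = 10
      · subst h10; simp [isLogfileGoA, isLogfileGoB, hver]
      · have hw2 : 11 - (n+1) = 10 - n := by omega
        have := ih (n+1) (by omega)
        rw [hw2] at this
        simp [isLogfileGoA, isLogfileGoB, hver, h10, this]

-- ===== VERDICT (by name: the statement is the Claim_ definition above) =====
theorem is_logfile_spec : Claim_equal_is_logfile := by
  intro lFile _
  unfold Spec_is_logfile is_logfile
  rw [isLogfileGoA_false lFile 0 (by omega), goB_eq_altCore _ 0]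
  have h : PySem.List.slice lFile none (some 11) = lFile.take (11:Int).toNat :=
    PySem.List.slice_to (xs := lFile) (by norm_num)
  show altCore 0 (lFile.take (11 - 0)) = is_logfile_alt lFile
  simp only [is_logfile_alt, h, altCore, versIdx, repsIdx]
  rfl
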